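-- pv_equiv track=rewrite | github.com/daniel-reich/ubiquitous-fiesta | kiX7WjSFeTmBYcEgK_2.py | major_sum
-- ===== SOURCE A (Python) =====
-- def major_sum(lst):
--   neg = abs(sum([i for i in lst if i < 0]))
--   pos = sum([i for i in lst if i > 0])
--   zero = lst.count(0)
--   the_max = max(neg, pos, zero)
--   if the_max == neg:
--     return neg * -1
--   return the_max
-- ===== SOURCE B (Python) =====
-- def major_sum(lst):
--   s = sorted(lst)
--   n = len(s)
--   k = 0
--   neg_sum = 0
--   while k < n and s[k] < 0:
--     neg_sum += s[k]
--     k += 1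
--   zero = 0
--   while k < n and s[k] == 0:
--     zero += 1
--     k += 1
--   pos = 0
--   while k < n:
--     pos += s[k]
--     k += 1
--   neg = -neg_sum
--   the_max = max(neg, pos, zero)
--   if the_max == neg:
--     return -neg
--   return the_max
-- ===== Notes on version B (the rewrite author's own statement) =====
-- stated objective: alternative
-- what changed: B sorts the list once and then walks it sequentially: the sorted order groups negatives, zeros and positives into contiguous segments, so one ordered scan with three stopping points replaces A's three independent filter/count passes over the unsorted list.
import Mathlib
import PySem

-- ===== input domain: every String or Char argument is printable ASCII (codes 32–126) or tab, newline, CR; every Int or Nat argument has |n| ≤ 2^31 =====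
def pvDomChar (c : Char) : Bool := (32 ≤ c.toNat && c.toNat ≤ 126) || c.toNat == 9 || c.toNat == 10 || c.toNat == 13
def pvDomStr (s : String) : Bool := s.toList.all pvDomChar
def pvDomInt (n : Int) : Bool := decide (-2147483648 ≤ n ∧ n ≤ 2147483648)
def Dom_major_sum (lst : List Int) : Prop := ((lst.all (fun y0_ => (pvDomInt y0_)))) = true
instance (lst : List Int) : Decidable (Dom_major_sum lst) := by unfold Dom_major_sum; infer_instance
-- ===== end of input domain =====

-- B sorts the list once and walks it sequentially (negatives, zeros, positives are contiguous
-- segments after sorting) instead of A's three independent filter/count passes: alternative decomposition.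

-- ===== PORT A =====
def major_sum (lst : List Int) : Int :=
  let neg : Int := |(lst.filter (fun i => i < 0)).sum|
  let pos : Int := (lst.filter (fun i => i > 0)).sum
  let zero : Int := (lst.count 0 : Nat)
  let the_max := max (max neg pos) zero
  if the_max = neg then neg * -1 else the_max

-- ===== PORT B =====
-- first while loop: advance while the current element is negative, accumulating neg_sum;
-- returns (neg_sum, remaining suffix)
def msLoopNeg : List Int → Int → Int × List Int
  | x :: rest, acc => if x < 0 then msLoopNeg rest (acc + x) else (acc, x :: rest)
  | [], acc => (acc, [])

-- second while loop: advance while the current element equals 0, counting zeros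
def msLoopZero : List Int → Int → Int × List Int
  | x :: rest, acc => if x = 0 then msLoopZero rest (acc + 1) else (acc, x :: rest)
  | [], acc => (acc, [])

def major_sum_alt (lst : List Int) : Int :=
  let s := PySem.List.sorted lst (fun x => x) false
  let p1 := msLoopNeg s 0
  let p2 := msLoopZero p1.2 0
  -- third while loop: sum the remaining (positive) suffix
  let pos := p2.2.foldl (fun acc x => acc + x) 0
  let neg := -p1.1
  let the_max := max (max neg pos) p2.1
  if the_max = neg then -neg else the_max

-- ===== PRECONDITION & SPEC =====
def Spec_major_sum (lst : List Int) (out : Int) : Prop := out = major_sum_alt lst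
instance (lst : List Int) (out : Int) : Decidable (Spec_major_sum lst out) := by unfold Spec_major_sum; infer_instance

-- ===== CLAIM (what is proved, stated in full; the proofs are below) =====
def Claim_equal_major_sum : Prop := ∀ (lst : List Int), Dom_major_sum lst → Spec_major_sum lst (major_sum lst)

-- ===== LEMMAS AND PROOFS =====

theorem msLoopNeg_sorted (s : List Int) (a : Int)
    (hs : s.Pairwise (fun x y => x ≤ y)) :
    msLoopNeg s a = (a + (s.filter (fun x => decide (x < 0))).sum,
                     s.filter (fun x => !decide (x < 0))) := by
  induction s generalizing a with
  | nil => simp [msLoopNeg]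
  | cons x rest ih =>
    rcases List.pairwise_cons.mp hs with ⟨hx, hrest⟩
    by_cases h : x < 0
    · simp [msLoopNeg, h, ih _ hrest]
      ring
    · have hall : ∀ y ∈ rest, ¬ y < 0 := fun y hy => by have := hx y hy; omega
      have h1 : rest.filter (fun x => decide (x < 0)) = [] := by
        rw [List.filter_eq_nil_iff]; intro y hy; simpa using hall y hy
      have h2 : rest.filter (fun x => !decide (x < 0)) = rest := by
        rw [List.filter_eq_self]; intro y hy; simpa using hall y hy
      simp [msLoopNeg, h, h1, h2]

theorem msLoopZero_sorted (s : List Int) (a : Int)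
    (hs : s.Pairwise (fun x y => x ≤ y)) (hnn : ∀ y ∈ s, 0 ≤ y) :
    msLoopZero s a = (a + (s.count 0 : Nat),
                      s.filter (fun x => decide (0 < x))) := by
  induction s generalizing a with
  | nil => simp [msLoopZero]
  | cons x rest ih =>
    rcases List.pairwise_cons.mp hs with ⟨hx, hrest⟩
    have hnn' : ∀ y ∈ rest, 0 ≤ y := fun y hy => hnn y (List.mem_cons_of_mem _ hy)
    by_cases h : x = 0
    · simp [msLoopZero, h, ih _ hrest hnn']
      ring
    · have hxpos : 0 < x := lt_of_le_of_ne (hnn x (List.mem_cons_self)) (Ne.symm h)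
      have hall : ∀ y ∈ rest, 0 < y := fun y hy => lt_of_lt_of_le hxpos (hx y hy)
      have h1 : rest.count 0 = 0 := by
        rw [List.count_eq_zero]; intro hy; have := hall 0 hy; omega
      have h2 : rest.filter (fun x => decide (0 < x)) = rest := by
        rw [List.filter_eq_self]; intro y hy; simpa using hall y hy
      simp [msLoopZero, h, hxpos, h1, h2]

theorem filter_pos_of_nonneg (s : List Int) :
    (s.filter (fun x => !decide (x < 0))).filter (fun x => decide (0 < x))
      = s.filter (fun x => decide (0 < x)) := by
  induction s with
  | nil => simp
  | cons x rest ih =>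
    by_cases h : x < 0
    · have : ¬ (0 < x) := by omega
      simp [h, this, ih]
    · simp [List.filter_cons, h, ih]

theorem negsum_nonpos (lst : List Int) : ((lst.filter (fun i => decide (i < 0))).sum) ≤ 0 := by
  induction lst with
  | nil => simp
  | cons x xs ih =>
    by_cases hx : x < 0 <;> simp [hx] <;> omega

-- ===== VERDICT (by name: the statement is the Claim_ definition above) =====
theorem major_sum_spec : Claim_equal_major_sum := by
  intro lst _
  unfold Spec_major_sum major_sum major_sum_alt
  dsimp only
  have hperm : (PySem.List.sorted lst (fun x => x) false).Perm lst :=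
    PySem.List.sorted_perm lst (fun x => x) false
  have hpw : (PySem.List.sorted lst (fun x => x) false).Pairwise (fun a b => a ≤ b) := by
    simpa using PySem.List.sorted_pairwise lst (fun x => x)
  set s := PySem.List.sorted lst (fun x => x) false with hsdef
  rw [msLoopNeg_sorted s 0 hpw]
  have hpw2 : (s.filter (fun x => !decide (x < 0))).Pairwise (fun a b => a ≤ b) :=
    List.Pairwise.filter _ hpw
  have hnn2 : ∀ y ∈ s.filter (fun x => !decide (x < 0)), 0 ≤ y := by
    intro y hy
    have := List.of_mem_filter hy
    simp at this; omega
  rw [msLoopZero_sorted _ 0 hpw2 hnn2]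
  simp only [zero_add]
  rw [filter_pos_of_nonneg]
  -- translate the three aggregates from s back to lst via the permutation
  have hneg : (s.filter (fun x => decide (x < 0))).sum
      = (lst.filter (fun i => decide (i < 0))).sum :=
    List.Perm.sum_eq (hperm.filter _)
  have hpos : (s.filter (fun x => decide (0 < x))).sum
      = (lst.filter (fun i => decide (i > 0))).sum := by
    have := List.Perm.sum_eq (hperm.filter (fun x => decide (0 < x)))
    simpa [gt_iff_lt] using this
  have hcnt : (s.filter (fun x => !decide (x < 0))).count 0 = lst.count 0 := by
    have h1 : (s.filter (fun x => !decide (x < 0))).count 0 = s.count 0 := by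
      induction s with
      | nil => simp
      | cons x rest ih =>
        by_cases h : x < 0
        · have : x ≠ 0 := by omega
          simp [List.filter_cons, h, List.count_cons, this, ih]
        · simp [h, List.count_cons, ih]
    rw [h1]; exact hperm.count_eq 0
  have hfold : ∀ (l : List Int) (a : Int), l.foldl (fun acc x => acc + x) a = a + l.sum := by
    intro l
    induction l with
    | nil => intro a; simp
    | cons x rest ih => intro a; simp [List.foldl_cons, ih]; ring
  rw [hfold]
  simp only [zero_add, hneg, hpos, hcnt]
  have habs : |(lst.filter (fun i => decide (i < 0))).sum|
      = -(lst.filter (fun i => decide (i < 0))).sum :=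
    abs_of_nonpos (negsum_nonpos lst)
  rw [habs]
  ring_nf
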